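-- pv_equiv track=rewrite | github.com/gistable/gistable | dockerized-gists/92061d1d5dff99e14cb6/snippet.py | finalStringFromArray
-- ===== SOURCE A (Python) =====
-- def finalStringFromArray(array):
-- 	removeX = shouldRemoveX(array)
-- 	finalString = ''
-- 	i = 0
-- 	for  i in range(0,len(array)):
-- 		if array[i] != None:
-- 			if array[i][:3] == 'add':
-- 				break
-- 			if array[i][:3] == '/r/':
-- 				if removeX:
-- 					finalString = finalString + array[i][3:-1]
-- 				else:
-- 					finalString = finalString + array[i][3:]
-- 				finalString = finalString + "+"
-- 	finalString = finalString[:-1]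
-- 	return finalString
--
-- def shouldRemoveX(array):
-- 	numX = 0
-- 	numReddits = 0
-- 	for  i in range(0,len(array)):
-- 		if array[i] != None:
-- 			if array[i][:3] == 'add':
-- 				break
-- 			if array[i][:3] == '/r/':
-- 				numReddits +=1
-- 				if array[i][-1:] ==  'x':
-- 					numX += 1
-- 	return numReddits == numX
-- ===== SOURCE B (Python) =====
-- def finalStringFromArray(array):
--     pieces = []
--     all_x = True
--     for s in array:
--         if s is None:
--             continue
--         if s[:3] == 'add':
--             break
--         if s[:3] == '/r/':
--             piece = s[3:]
--             pieces.append(piece)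
--             if not piece.endswith('x'):
--                 all_x = False
--     if all_x:
--         pieces = [p[:-1] for p in pieces]
--     return '+'.join(pieces)
-- ===== Notes on version B (the rewrite author's own statement) =====
-- stated objective: simpler
-- what changed: one collect pass gathers the '/r/' suffixes into a list while tracking an all-end-in-'x' flag, then a post-loop map strips the trailing 'x' and '+'.join builds the result, replacing A's separate shouldRemoveX counting scan plus a second concatenation loop with trailing-'+' strip
import Mathlib
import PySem

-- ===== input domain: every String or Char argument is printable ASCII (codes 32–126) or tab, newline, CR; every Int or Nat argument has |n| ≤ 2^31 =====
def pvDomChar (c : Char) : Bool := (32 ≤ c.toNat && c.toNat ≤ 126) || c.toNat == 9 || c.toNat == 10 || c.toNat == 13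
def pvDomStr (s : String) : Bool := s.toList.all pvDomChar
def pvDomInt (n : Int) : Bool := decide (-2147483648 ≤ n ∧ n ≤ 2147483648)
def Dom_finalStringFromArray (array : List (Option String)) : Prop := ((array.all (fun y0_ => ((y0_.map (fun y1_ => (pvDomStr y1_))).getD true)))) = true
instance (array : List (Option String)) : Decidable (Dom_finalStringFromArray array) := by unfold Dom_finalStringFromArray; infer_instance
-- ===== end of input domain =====

-- B merges A's two scans (shouldRemoveX + concatenation) into one collect pass followed by a map and a '+'-join; return value only, no mutation.

-- ===== PORT A =====
-- the for-loop of shouldRemoveX: carries (numX, numReddits), 'break' on 'add'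
def pvCountLoop : List (Option String) → Int → Int → Int × Int
  | [], numX, numReddits => (numX, numReddits)
  | a :: rest, numX, numReddits =>
    match a with
    | none => pvCountLoop rest numX numReddits
    | some s =>
      if PySem.Chars.slice s.toList none (some 3) = ['a','d','d'] then (numX, numReddits)
      else if PySem.Chars.slice s.toList none (some 3) = ['/','r','/'] then
        if PySem.Chars.slice s.toList (some (-1)) none = ['x'] then
          pvCountLoop rest (numX + 1) (numReddits + 1)
        else
          pvCountLoop rest numX (numReddits + 1)
      else pvCountLoop rest numX numReddits

def pvShouldRemoveX (array : List (Option String)) : Bool :=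
  let p := pvCountLoop array 0 0
  p.2 == p.1

-- the for-loop of finalStringFromArray: accumulates finalString (as List Char), 'break' on 'add'
def pvBuildLoop (removeX : Bool) : List (Option String) → List Char → List Char
  | [], acc => acc
  | a :: rest, acc =>
    match a with
    | none => pvBuildLoop removeX rest acc
    | some s =>
      if PySem.Chars.slice s.toList none (some 3) = ['a','d','d'] then acc
      else if PySem.Chars.slice s.toList none (some 3) = ['/','r','/'] then
        pvBuildLoop removeX rest
          ((if removeX then acc ++ PySem.Chars.slice s.toList (some 3) (some (-1))
            else acc ++ PySem.Chars.slice s.toList (some 3) none) ++ ['+'])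
      else pvBuildLoop removeX rest acc

def finalStringFromArray (array : List (Option String)) : String :=
  let removeX := pvShouldRemoveX array
  String.ofList (PySem.Chars.slice (pvBuildLoop removeX array []) none (some (-1)))

-- ===== PORT B =====
-- B's single pass: collects the '/r/' suffixes and whether all of them end in 'x'
def pvCollectLoop : List (Option String) → List (List Char) → Bool → List (List Char) × Bool
  | [], pieces, allx => (pieces, allx)
  | a :: rest, pieces, allx =>
    match a with
    | none => pvCollectLoop rest pieces allx
    | some s =>
      if PySem.Chars.slice s.toList none (some 3) = ['a','d','d'] then (pieces, allx)
      else if PySem.Chars.slice s.toList none (some 3) = ['/','r','/'] then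
        pvCollectLoop rest (pieces ++ [PySem.Chars.slice s.toList (some 3) none])
          (allx && PySem.Chars.endswith (PySem.Chars.slice s.toList (some 3) none) ['x'])
      else pvCollectLoop rest pieces allx

def finalStringFromArray_alt (array : List (Option String)) : String :=
  let st := pvCollectLoop array [] true
  let pieces := if st.2 then st.1.map (fun p => PySem.Chars.slice p none (some (-1))) else st.1
  String.ofList (PySem.Chars.join ['+'] pieces)

-- ===== PRECONDITION & SPEC =====
def Spec_finalStringFromArray (array : List (Option String)) (out : String) : Prop := out = finalStringFromArray_alt array
instance (array : List (Option String)) (out : String) : Decidable (Spec_finalStringFromArray array out) := by unfold Spec_finalStringFromArray; infer_instance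

-- ===== CLAIM (what is proved, stated in full; the proofs are below) =====
def Claim_equal_finalStringFromArray : Prop := ∀ (array : List (Option String)), Dom_finalStringFromArray array → Spec_finalStringFromArray array (finalStringFromArray array)

-- ===== LEMMAS AND PROOFS =====

-- the '/r/' suffixes (up to the 'add' break) both programs process, as a pure list
def pvPieces : List (Option String) → List (List Char)
  | [] => []
  | none :: rest => pvPieces rest
  | some s :: rest =>
    if s.toList.take 3 = ['a','d','d'] then []
    else if s.toList.take 3 = ['/','r','/'] then s.toList.drop 3 :: pvPieces rest
    else pvPieces rest

-- slice bridges
theorem pv_slice_take3 (xs : List Char) : PySem.List.slice xs none (some 3) = xs.take 3 := by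
  simp [pysem]

theorem pv_slice_drop3 (xs : List Char) : PySem.List.slice xs (some 3) none = xs.drop 3 := by
  simp [pysem]

theorem pv_slice_3_neg1 (xs : List Char) :
    PySem.List.slice xs (some 3) (some (-1)) = (xs.drop 3).dropLast := by
  simp only [PySem.List.slice, PySem.List.clampIdx]
  norm_num
  have ht : Int.toNat 3 = 3 := rfl
  rw [ht]
  by_cases hlen : xs.length ≤ 3
  · rw [min_eq_right hlen, List.drop_length, List.drop_eq_nil_iff.mpr (by omega)]
    simp
  · have hnil : ¬ xs = [] := by intro h; subst h; simp at hlen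
    rw [min_eq_left (by omega), if_neg hnil, List.dropLast_eq_take]
    congr 1
    simp [List.length_drop]
    omega

theorem pv_endswith_concat (q : List Char) (c : Char) :
    (PySem.Chars.endswith (q ++ [c]) ['x'] = true) ↔ c = 'x' := by
  rw [PySem.Chars.endswith_iff]
  constructor
  · rintro ⟨t, ht⟩
    have := congrArg List.getLast? ht
    simpa using this.symm
  · rintro rfl; exact List.suffix_append q ['x']

-- per-entry: on a '/r/' entry, A's test s[-1:] == 'x' coincides with B's test (s[3:]).endswith('x')
theorem pv_lastx_iff (cs : List Char) (h : cs.take 3 = ['/','r','/']) :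
    (PySem.List.slice cs (some (-1)) none = ['x']) ↔ PySem.Chars.endswith (cs.drop 3) ['x'] = true := by
  rw [PySem.List.slice_from_neg_one]
  obtain ⟨t, rfl⟩ : ∃ t, cs = '/' :: 'r' :: '/' :: t := by
    rcases cs with _ | ⟨a, _ | ⟨b, _ | ⟨c, t⟩⟩⟩ <;> simp [List.take] at h
    obtain ⟨rfl, rfl, rfl⟩ := h
    exact ⟨t, rfl⟩
  · rcases t.eq_nil_or_concat with rfl | ⟨q, c, hqc⟩
    · simp [PySem.Chars.endswith]
    · rw [List.concat_eq_append] at hqc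
      subst hqc
      have hlen : ('/' :: 'r' :: '/' :: (q ++ [c])).length - 1 = 3 + q.length := by
        simp; omega
      rw [hlen]
      have hdrop : ('/' :: 'r' :: '/' :: (q ++ [c])).drop (3 + q.length) = [c] := by
        rw [show ('/' :: 'r' :: '/' :: (q ++ [c])) = ('/' :: 'r' :: '/' :: q) ++ [c] by simp,
          show 3 + q.length = ('/' :: 'r' :: '/' :: q).length by simp; omega,
          List.drop_left]
      have hdrop3 : ('/' :: 'r' :: '/' :: (q ++ [c])).drop 3 = q ++ [c] := rfl
      rw [hdrop, hdrop3, pv_endswith_concat]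
      constructor
      · intro hx; injection hx
      · rintro rfl; rfl

-- B's collect loop computes pvPieces and the all-end-in-'x' flag
theorem pv_collect_eq (l : List (Option String)) (acc : List (List Char)) (b : Bool) :
    pvCollectLoop l acc b =
      (acc ++ pvPieces l, b && (pvPieces l).all (fun p => PySem.Chars.endswith p ['x'])) := by
  induction l generalizing acc b with
  | nil => simp [pvCollectLoop, pvPieces]
  | cons a rest ih =>
    match a with
    | none => simpa [pvCollectLoop, pvPieces] using ih acc b
    | some s =>
      simp only [pvCollectLoop, pvPieces, pv_slice_take3, pv_slice_drop3,
        PySem.Chars.slice_eq_listSlice]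
      by_cases h1 : s.toList.take 3 = ['a','d','d']
      · simp [h1]
      · by_cases h2 : s.toList.take 3 = ['/','r','/']
        · simp only [if_neg h1, if_pos h2, ih]
          simp [Bool.and_assoc]
        · simp [h1, h2, ih]

-- A's count loop counts the pieces and how many of them end in 'x'
theorem pv_count_eq (l : List (Option String)) (x r : Int) :
    pvCountLoop l x r =
      (x + ((pvPieces l).countP (fun p => PySem.Chars.endswith p ['x']) : Int),
       r + ((pvPieces l).length : Int)) := by
  induction l generalizing x r with
  | nil => simp [pvCountLoop, pvPieces]
  | cons a rest ih =>
    match a with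
    | none => simpa [pvCountLoop, pvPieces] using ih x r
    | some s =>
      simp only [pvCountLoop, pvPieces, pv_slice_take3, PySem.Chars.slice_eq_listSlice]
      by_cases h1 : s.toList.take 3 = ['a','d','d']
      · simp [h1]
      · by_cases h2 : s.toList.take 3 = ['/','r','/']
        · simp only [if_neg h1, if_pos h2]
          by_cases h3 : PySem.Chars.endswith (s.toList.drop 3) ['x'] = true
          · rw [if_pos ((pv_lastx_iff s.toList h2).mpr h3), ih]
            simp only [Prod.mk.injEq, List.countP_cons, List.length_cons, h3]
            constructor <;> push_cast <;> ring
          · rw [if_neg (fun hc => h3 ((pv_lastx_iff s.toList h2).mp hc)), ih]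
            rw [Bool.not_eq_true] at h3
            simp only [Prod.mk.injEq, List.countP_cons, List.length_cons, h3]
            constructor <;> push_cast <;> ring
        · simp [h1, h2, ih]

-- removeX = B's flag
theorem pv_removeX_eq (array : List (Option String)) :
    pvShouldRemoveX array = (pvPieces array).all (fun p => PySem.Chars.endswith p ['x']) := by
  unfold pvShouldRemoveX
  rw [pv_count_eq]
  by_cases h : (pvPieces array).all (fun p => PySem.Chars.endswith p ['x']) = true
  · rw [h]
    have hc : (pvPieces array).countP (fun p => PySem.Chars.endswith p ['x']) = (pvPieces array).length :=
      List.countP_eq_length.mpr (fun a ha => List.all_eq_true.mp h a ha)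
    simp [hc]
  · rw [Bool.not_eq_true] at h
    rw [h]
    have hc : (pvPieces array).countP (fun p => PySem.Chars.endswith p ['x']) ≠ (pvPieces array).length := by
      intro hc
      have hall := List.countP_eq_length.mp hc
      rw [Bool.eq_false_iff] at h
      exact h (List.all_eq_true.mpr hall)
    simp only [zero_add, beq_eq_false_iff_ne, ne_eq, Nat.cast_inj]
    intro he
    exact hc (by exact_mod_cast he.symm)

-- A's build loop is a flatMap over the pieces
theorem pv_build_eq (rx : Bool) (l : List (Option String)) (acc : List Char) :
    pvBuildLoop rx l acc =
      acc ++ (pvPieces l).flatMap (fun p => (if rx then p.dropLast else p) ++ ['+']) := by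
  induction l generalizing acc with
  | nil => simp [pvBuildLoop, pvPieces]
  | cons a rest ih =>
    match a with
    | none => simpa [pvBuildLoop, pvPieces] using ih acc
    | some s =>
      simp only [pvBuildLoop, pvPieces, pv_slice_take3, pv_slice_drop3, pv_slice_3_neg1,
        PySem.Chars.slice_eq_listSlice]
      by_cases h1 : s.toList.take 3 = ['a','d','d']
      · simp [h1]
      · by_cases h2 : s.toList.take 3 = ['/','r','/']
        · simp only [if_neg h1, if_pos h2, ih]
          cases rx <;> simp
        · simp [h1, h2, ih]

-- dropping the final '+' of the flatMap gives the '+'-join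
theorem pv_flatMap_dropLast (ps : List (List Char)) :
    (ps.flatMap (fun p => p ++ ['+'])).dropLast = PySem.Chars.join ['+'] ps := by
  induction ps with
  | nil => simp [PySem.Chars.join_nil]
  | cons p ps ih =>
    cases ps with
    | nil => simp [PySem.Chars.join_singleton]
    | cons q qs =>
      rw [PySem.Chars.join_cons_cons]
      have hne : (q :: qs).flatMap (fun p => p ++ ['+']) ≠ [] := by
        simp [List.flatMap_cons]
      rw [List.flatMap_cons, List.dropLast_append_of_ne_nil hne, ← ih]

-- ===== VERDICT (by name: the statement is the Claim_ definition above) =====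
theorem finalStringFromArray_spec : Claim_equal_finalStringFromArray := by
  intro array _
  unfold Spec_finalStringFromArray
  show String.ofList (PySem.Chars.slice (pvBuildLoop (pvShouldRemoveX array) array []) none (some (-1)))
      = String.ofList (PySem.Chars.join ['+']
          (if (pvCollectLoop array [] true).2 then
            (pvCollectLoop array [] true).1.map (fun p => PySem.Chars.slice p none (some (-1)))
          else (pvCollectLoop array [] true).1))
  rw [pv_collect_eq, pv_build_eq, pv_removeX_eq]
  simp only [List.nil_append, Bool.true_and, PySem.Chars.slice_eq_listSlice,
    PySem.List.slice_to_neg_one]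
  by_cases h : (pvPieces array).all (fun p => PySem.Chars.endswith p ['x']) = true
  · rw [h]
    congr 1
    rw [← pv_flatMap_dropLast]
    simp [List.flatMap_map]
  · rw [Bool.not_eq_true] at h
    rw [h]
    congr 1
    rw [← pv_flatMap_dropLast]
    simp
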